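-- pv_equiv track=rewrite | github.com/Brkozkn/VarConfirm | varconfirm.py | _is_primary_chromosome
-- ===== SOURCE A (Python) =====
-- def _is_primary_chromosome(chrom: str) -> bool:
--     """
--     Check if chromosome is a primary reference chromosome.
--
--     Filters out:
--     - Unplaced scaffolds (chrUn_*)
--     - Alt haplotypes (*_alt, *_hap*)
--     - Random chromosomes (*_random)
--     - Unknown/unlocalized contigs
--     - Patch sequences (*_fix, *_novel)
--     """
--     chrom_lower = chrom.lower()
--
--     # List of valid primary chromosomes
--     primary_chroms = {
--         'chr1', 'chr2', 'chr3', 'chr4', 'chr5', 'chr6', 'chr7', 'chr8',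
--         'chr9', 'chr10', 'chr11', 'chr12', 'chr13', 'chr14', 'chr15',
--         'chr16', 'chr17', 'chr18', 'chr19', 'chr20', 'chr21', 'chr22',
--         'chrx', 'chry', 'chrm', 'chrmt',
--         # Also accept without 'chr' prefix
--         '1', '2', '3', '4', '5', '6', '7', '8', '9', '10', '11', '12',
--         '13', '14', '15', '16', '17', '18', '19', '20', '21', '22',
--         'x', 'y', 'm', 'mt'
--     }
--
--     # Check if it's a primary chromosome
--     if chrom_lower in primary_chroms:
--         return True
--
--     # Filter patterns for non-primary sequences
--     filter_patterns = [
--         'unknown', 'un_', 'random', '_alt', '_hap',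
--         '_fix', '_novel', 'scaffold', 'contig', 'patch'
--     ]
--
--     for pattern in filter_patterns:
--         if pattern in chrom_lower:
--             return False
--
--     # If it starts with 'chr' followed by just a number or X/Y/M, it's primary
--     if chrom_lower.startswith('chr'):
--         suffix = chrom_lower[3:]
--         if suffix.isdigit() or suffix in ['x', 'y', 'm', 'mt']:
--             return True
--
--     return False
-- ===== SOURCE B (Python) =====
-- _BARE = {'1', '2', '3', '4', '5', '6', '7', '8', '9', '10', '11', '12',
--          '13', '14', '15', '16', '17', '18', '19', '20', '21', '22',
--          'x', 'y', 'm', 'mt'}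
-- _SUFFIX = {'x', 'y', 'm', 'mt'}
--
--
-- def _is_primary_chromosome(chrom: str) -> bool:
--     c = chrom.lower()
--     if c in _BARE:
--         return True
--     if c.startswith('chr'):
--         s = c[3:]
--         return s.isdigit() or s in _SUFFIX
--     return False
-- ===== Notes on version B (the rewrite author's own statement) =====
-- stated objective: simpler
-- what changed: B drops A's 52-entry whitelist and its ten-pattern substring-filter loop (which is provably dead) and computes the predicate as a direct positive match: bare names against the 26-entry set, prefixed names by whether the suffix is all digits or one of x/y/m/mt.
import Mathlib
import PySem

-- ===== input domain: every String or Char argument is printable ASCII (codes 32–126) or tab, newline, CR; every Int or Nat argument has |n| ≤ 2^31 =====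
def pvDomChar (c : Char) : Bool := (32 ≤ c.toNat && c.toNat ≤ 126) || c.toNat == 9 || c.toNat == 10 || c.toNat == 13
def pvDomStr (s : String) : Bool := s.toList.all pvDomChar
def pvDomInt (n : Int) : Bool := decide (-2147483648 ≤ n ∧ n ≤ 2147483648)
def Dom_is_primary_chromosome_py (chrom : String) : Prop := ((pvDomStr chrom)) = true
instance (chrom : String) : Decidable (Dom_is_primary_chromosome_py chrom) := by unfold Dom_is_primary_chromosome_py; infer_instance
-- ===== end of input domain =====

-- B replaces A's 52-entry whitelist and dead ten-pattern substring-filter loop by a direct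
-- positive match (bare set, else 'chr'-prefix with digit/x-y-m-mt suffix); objective: simpler.


-- ===== PORT A =====
def pvPrimaryChroms : List String :=
  ["chr1", "chr2", "chr3", "chr4", "chr5", "chr6", "chr7", "chr8",
   "chr9", "chr10", "chr11", "chr12", "chr13", "chr14", "chr15",
   "chr16", "chr17", "chr18", "chr19", "chr20", "chr21", "chr22",
   "chrx", "chry", "chrm", "chrmt",
   "1", "2", "3", "4", "5", "6", "7", "8", "9", "10", "11", "12",
   "13", "14", "15", "16", "17", "18", "19", "20", "21", "22",
   "x", "y", "m", "mt"]

def pvFilterPatterns : List String :=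
  ["unknown", "un_", "random", "_alt", "_hap",
   "_fix", "_novel", "scaffold", "contig", "patch"]

def is_primary_chromosome_py (chrom : String) : Bool :=
  let chrom_lower := PySem.Str.lower chrom
  if pvPrimaryChroms.contains chrom_lower then true
  else if pvFilterPatterns.any (fun p => PySem.Str.isIn p chrom_lower) then false
  else if PySem.Str.startswith chrom_lower "chr" then
    let suffix := PySem.Str.slice chrom_lower (some 3) none
    if PySem.Str.strIsdigit suffix || (["x", "y", "m", "mt"] : List String).contains suffix then true
    else false
  else false

-- ===== PORT B =====
def pvBareChroms : List String :=
  ["1", "2", "3", "4", "5", "6", "7", "8", "9", "10", "11", "12",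
   "13", "14", "15", "16", "17", "18", "19", "20", "21", "22",
   "x", "y", "m", "mt"]

def is_primary_chromosome_py_alt (chrom : String) : Bool :=
  let c := PySem.Str.lower chrom
  if pvBareChroms.contains c then true
  else if PySem.Str.startswith c "chr" then
    let s := PySem.Str.slice c (some 3) none
    PySem.Str.strIsdigit s || (["x", "y", "m", "mt"] : List String).contains s
  else false

-- ===== PRECONDITION & SPEC =====
def Spec_is_primary_chromosome_py (chrom : String) (out : Bool) : Prop := out = is_primary_chromosome_py_alt chrom
instance (chrom : String) (out : Bool) : Decidable (Spec_is_primary_chromosome_py chrom out) := by unfold Spec_is_primary_chromosome_py; infer_instance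

-- ===== CLAIM (what is proved, stated in full; the proofs are below) =====
def Claim_equal_is_primary_chromosome_py : Prop := ∀ (chrom : String), Dom_is_primary_chromosome_py chrom → Spec_is_primary_chromosome_py chrom (is_primary_chromosome_py chrom)

-- ===== LEMMAS AND PROOFS =====

-- A pattern containing a char that is neither 'c','h','r', a digit, nor x/y/m/t cannot occur
-- in a string "chr" ++ t whose tail chars are all digits or x/y/m/t.
theorem pv_no_pattern (c p : String) (w : Char) (t : List Char)
    (hw : w ∈ p.toList)
    (hwc : PySem.Chars.isdigit w = false ∧ w ∉ (['c', 'h', 'r', 'x', 'y', 'm', 't'] : List Char))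
    (hcl : c.toList = 'c' :: 'h' :: 'r' :: t)
    (ht : ∀ ch ∈ t, PySem.Chars.isdigit ch = true ∨ ch ∈ (['x', 'y', 'm', 't'] : List Char)) :
    PySem.Str.isIn p c = false := by
  rw [← Bool.not_eq_true, PySem.Str.isIn_iff_infix]
  intro hinf
  have hwcl : w ∈ c.toList := hinf.subset hw
  rw [hcl] at hwcl
  simp only [List.mem_cons] at hwcl
  rcases hwcl with h | h | h | h
  · exact hwc.2 (by simp [h])
  · exact hwc.2 (by simp [h])
  · exact hwc.2 (by simp [h])
  · rcases ht w h with hd | hm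
    · rw [hwc.1] at hd; exact Bool.false_ne_true hd
    · exact hwc.2 (by simp_all)

-- With a 'chr' prefix and an accepted suffix, every filter pattern misses.
theorem pv_patterns_dead (c : String) (hs : PySem.Str.startswith c "chr" = true)
    (hd : PySem.Str.strIsdigit (PySem.Str.slice c (some 3) none) = true ∨
          PySem.Str.slice c (some 3) none ∈ (["x", "y", "m", "mt"] : List String)) :
    pvFilterPatterns.any (fun p => PySem.Str.isIn p c) = false := by
  rw [PySem.Str.startswith_eq, PySem.Chars.startswith_iff] at hs
  obtain ⟨t, htl⟩ := hs
  have hcl : c.toList = 'c' :: 'h' :: 'r' :: t := by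
    rw [← htl]; rfl
  have hslice : (PySem.Str.slice c (some 3) none).toList = t := by
    rw [PySem.Str.toList_slice, PySem.Chars.slice_eq_listSlice,
        PySem.List.slice_from _ (by norm_num : (0:Int) ≤ 3), hcl]
    rfl
  have ht : ∀ ch ∈ t, PySem.Chars.isdigit ch = true ∨ ch ∈ (['x', 'y', 'm', 't'] : List Char) := by
    rcases hd with hd | hm
    · intro ch hch
      rw [PySem.Str.strIsdigit_eq, hslice, PySem.Chars.strIsdigit] at hd
      simp only [Bool.and_eq_true, List.all_eq_true] at hd
      exact Or.inl (hd.2 ch hch)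
    · have htl' : t = ['x'] ∨ t = ['y'] ∨ t = ['m'] ∨ t = ['m', 't'] := by
        simp only [List.mem_cons, List.not_mem_nil, or_false] at hm
        rcases hm with h | h | h | h <;> rw [← hslice, h] <;> decide
      intro ch hch
      rcases htl' with rfl | rfl | rfl | rfl <;> fin_cases hch <;> decide
  simp only [List.any_eq_false]
  intro p hp
  simp only [Bool.not_eq_true]
  fin_cases hp
  · exact pv_no_pattern c _ 'u' t (by decide) (by decide) hcl ht
  · exact pv_no_pattern c _ 'u' t (by decide) (by decide) hcl ht
  · exact pv_no_pattern c _ 'a' t (by decide) (by decide) hcl ht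
  · exact pv_no_pattern c _ '_' t (by decide) (by decide) hcl ht
  · exact pv_no_pattern c _ '_' t (by decide) (by decide) hcl ht
  · exact pv_no_pattern c _ '_' t (by decide) (by decide) hcl ht
  · exact pv_no_pattern c _ '_' t (by decide) (by decide) hcl ht
  · exact pv_no_pattern c _ 's' t (by decide) (by decide) hcl ht
  · exact pv_no_pattern c _ 'o' t (by decide) (by decide) hcl ht
  · exact pv_no_pattern c _ 'p' t (by decide) (by decide) hcl ht

-- Core equality, for an arbitrary (already lowercased) string c.
theorem pv_core (c : String) :
    (if pvPrimaryChroms.contains c then true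
     else if pvFilterPatterns.any (fun p => PySem.Str.isIn p c) then false
     else if PySem.Str.startswith c "chr" then
       if PySem.Str.strIsdigit (PySem.Str.slice c (some 3) none) ||
          (["x", "y", "m", "mt"] : List String).contains (PySem.Str.slice c (some 3) none) then true
       else false
     else false) =
    (if pvBareChroms.contains c then true
     else if PySem.Str.startswith c "chr" then
       PySem.Str.strIsdigit (PySem.Str.slice c (some 3) none) ||
       (["x", "y", "m", "mt"] : List String).contains (PySem.Str.slice c (some 3) none)
     else false) := by
  by_cases hprim : c ∈ pvPrimaryChroms
  · fin_cases hprim <;> decide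
  · have hA : pvPrimaryChroms.contains c = false := by
      simpa using hprim
    have hB : pvBareChroms.contains c = false := by
      simp only [List.contains_eq_mem, decide_eq_false_iff_not]
      intro hmem
      exact hprim (by fin_cases hmem <;> decide)
    rw [hA, hB]
    simp only [if_false, Bool.false_eq_true]
    by_cases hs : PySem.Str.startswith c "chr" = true
    · rw [if_pos hs, if_pos hs]
      cases hd : (PySem.Str.strIsdigit (PySem.Str.slice c (some 3) none) ||
          (["x", "y", "m", "mt"] : List String).contains (PySem.Str.slice c (some 3) none)) with
      | false =>
          cases hany : pvFilterPatterns.any (fun p => PySem.Str.isIn p c) <;> simp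
      | true =>
          have hd' : PySem.Str.strIsdigit (PySem.Str.slice c (some 3) none) = true ∨
              PySem.Str.slice c (some 3) none ∈ (["x", "y", "m", "mt"] : List String) := by
            simpa using hd
          rw [pv_patterns_dead c hs hd']
          simp
    · rw [if_neg hs, if_neg hs]
      cases hany : pvFilterPatterns.any (fun p => PySem.Str.isIn p c) <;> simp

-- ===== VERDICT (by name: the statement is the Claim_ definition above) =====
theorem is_primary_chromosome_py_spec : Claim_equal_is_primary_chromosome_py := by
  intro chrom _
  unfold Spec_is_primary_chromosome_py is_primary_chromosome_py is_primary_chromosome_py_alt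
  exact pv_core (PySem.Str.lower chrom)
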